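-- pv_equiv track=rewrite | github.com/nikhilsi/trading-recommendations-app | backend/app/services/screener_service.py | _get_all_tickers
-- ===== SOURCE A (Python) =====
-- from typing import List, Dict, Any, Optional
--
-- def _get_all_tickers(market_data: Dict) -> List[Dict]:
--     """Extract all tickers from market data"""
--     all_tickers = []
--
--     # Combine all categories
--     for category in ['gainers', 'losers', 'most_active', 'volume_movers']:
--         tickers = market_data.get(category, [])
--         for ticker in tickers:
--             # Avoid duplicates
--             if not any(t['symbol'] == ticker['symbol'] for t in all_tickers):
--                 all_tickers.append(ticker)
--
--     return all_tickers
-- ===== SOURCE B (Python) =====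
-- def _get_all_tickers(market_data):
--     """Extract all tickers from market data (first occurrence per symbol, in order)."""
--     combined = [t for c in ['gainers', 'losers', 'most_active', 'volume_movers']
--                 for t in market_data.get(c, [])]
--
--     def dedup(ts):
--         if not ts:
--             return []
--         head, rest = ts[0], ts[1:]
--         return [head] + dedup([t for t in rest if t['symbol'] != head['symbol']])
--
--     return dedup(combined)
-- ===== Notes on version B (the rewrite author's own statement) =====
-- stated objective: alternative
-- what changed: A's single accumulator loop with an inner any() membership scan is replaced by two staged passes: flatten the four categories into one list, then a structural recursion that keeps the head and filters every later same-symbol ticker out of the tail (nub-by-filtering-ahead), so no seen-accumulator or membership branch exists.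
import Mathlib
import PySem

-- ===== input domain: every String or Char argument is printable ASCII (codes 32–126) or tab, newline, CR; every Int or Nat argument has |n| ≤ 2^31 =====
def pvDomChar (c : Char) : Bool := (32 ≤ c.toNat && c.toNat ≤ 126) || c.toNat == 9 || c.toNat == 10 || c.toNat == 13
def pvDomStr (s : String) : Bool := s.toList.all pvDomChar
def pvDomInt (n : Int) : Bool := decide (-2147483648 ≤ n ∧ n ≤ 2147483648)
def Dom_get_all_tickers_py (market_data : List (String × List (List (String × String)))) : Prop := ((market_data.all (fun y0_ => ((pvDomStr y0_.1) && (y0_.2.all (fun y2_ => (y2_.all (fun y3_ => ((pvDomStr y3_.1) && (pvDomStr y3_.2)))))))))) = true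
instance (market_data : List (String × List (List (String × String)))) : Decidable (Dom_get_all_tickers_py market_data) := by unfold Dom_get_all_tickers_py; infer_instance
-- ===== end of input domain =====

-- B replaces A's accumulator-with-inner-membership-scan by two staged passes: flatten the four
-- categories into one list, then a structural-recursive dedup that filters later same-symbol
-- tickers out of the tail (nub by filtering ahead): simpler, no seen-structure at all.


-- ticker['symbol'] (both ports; inside Pre_ a missing key is only ever reachable when it is
-- never compared, so getD "" is semantically inert)
def pvSym (t : List (String × String)) : String := ((PySem.Dict.mk t).get? "symbol").getD ""

-- ===== PORT A =====
-- all_tickers = []; for category in [...]: for ticker in market_data.get(category, []):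
--   if not any(t['symbol'] == ticker['symbol'] for t in all_tickers): all_tickers.append(ticker)
def get_all_tickers_py (market_data : List (String × List (List (String × String)))) : List (List (String × String)) :=
  (["gainers", "losers", "most_active", "volume_movers"]).foldl
    (fun all_tickers category =>
      ((PySem.Dict.mk market_data).getD category []).foldl
        (fun all_tickers ticker =>
          if all_tickers.any (fun t => pvSym t == pvSym ticker) then all_tickers
          else all_tickers ++ [ticker])
        all_tickers)
    []

-- ===== PORT B =====
-- dedup(ts): [] if empty, else [head] + dedup([t for t in rest if t['symbol'] != head['symbol']])
def pvDedup : List (List (String × String)) → List (List (String × String))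
  | [] => []
  | head :: rest =>
      head :: pvDedup (rest.filter (fun t => !(pvSym t == pvSym head)))
termination_by ts => ts.length
decreasing_by
  simpa using le_trans (List.length_filter_le _ rest.attach) (by simp)

-- combined = [t for c in [...] for t in market_data.get(c, [])]; return dedup(combined)
def get_all_tickers_py_alt (market_data : List (String × List (List (String × String)))) : List (List (String × String)) :=
  pvDedup
    ((["gainers", "losers", "most_active", "volume_movers"]).flatMap
      (fun c => (PySem.Dict.mk market_data).getD c []))

-- ===== PRECONDITION & SPEC =====
-- Pre_ excludes exactly the inputs where A raises KeyError: a ticker in the four scanned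
-- categories lacks the 'symbol' key while at least two tickers are present (with at most one
-- ticker the subscript is never evaluated and both programs return normally).
def Pre_get_all_tickers_py (market_data : List (String × List (List (String × String)))) : Prop :=
  (((["gainers", "losers", "most_active", "volume_movers"]).all
     (fun category => ((PySem.Dict.mk market_data).getD category []).all
       (fun ticker => ((PySem.Dict.mk ticker).get? "symbol").isSome))) = true)
  ∨ ((["gainers", "losers", "most_active", "volume_movers"]).flatMap
       (fun c => (PySem.Dict.mk market_data).getD c [])).length ≤ 1
instance (market_data : List (String × List (List (String × String)))) : Decidable (Pre_get_all_tickers_py market_data) := by unfold Pre_get_all_tickers_py; infer_instance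

def pvWitness_get_all_tickers_py : (List (String × List (List (String × String)))) :=
  [("gainers", [[("symbol", "AAA"), ("price", "1")], [("symbol", "BBB")]]),
   ("losers", [[("symbol", "AAA"), ("price", "2")]])]

def Spec_get_all_tickers_py (market_data : List (String × List (List (String × String)))) (out : List (List (String × String))) : Prop := out = get_all_tickers_py_alt market_data
instance (market_data : List (String × List (List (String × String)))) (out : List (List (String × String))) : Decidable (Spec_get_all_tickers_py market_data out) := by unfold Spec_get_all_tickers_py; infer_instance

-- ===== CLAIM =====
def Claim_equal_get_all_tickers_py : Prop := ∀ (market_data : List (String × List (List (String × String)))), Dom_get_all_tickers_py market_data → Pre_get_all_tickers_py market_data → Spec_get_all_tickers_py market_data (get_all_tickers_py market_data)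

-- ===== LEMMAS AND PROOFS =====

-- equation lemmas for pvDedup (well-founded recursion)
lemma pvDedup_nil : pvDedup [] = [] := by rw [pvDedup]
lemma pvDedup_cons (head : List (String × String)) (rest : List (List (String × String))) :
    pvDedup (head :: rest)
      = head :: pvDedup (rest.filter (fun t => !(pvSym t == pvSym head))) := by
  rw [pvDedup]

-- A's inner step, named
def pvStepA (acc : List (List (String × String))) (ticker : List (String × String)) : List (List (String × String)) :=
  if acc.any (fun t => pvSym t == pvSym ticker) then acc else acc ++ [ticker]

-- A's accumulation over a list equals acc ++ filter-ahead dedup of the unseen part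
lemma pv_foldl_dedup (xs acc : List (List (String × String))) :
    xs.foldl pvStepA acc
      = acc ++ pvDedup (xs.filter (fun t => !acc.any (fun u => pvSym u == pvSym t))) := by
  induction xs generalizing acc with
  | nil => simp [pvDedup_nil]
  | cons x xs ih =>
      simp only [List.foldl_cons, List.filter_cons]
      by_cases hc : acc.any (fun u => pvSym u == pvSym x) = true
      · rw [show pvStepA acc x = acc from by simp [pvStepA, hc],
           if_neg (by simp [hc] : ¬ ((!acc.any fun u => pvSym u == pvSym x) = true))]
        exact ih acc
      · have hstep : pvStepA acc x = acc ++ [x] := by simp [pvStepA, hc]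
        have hkeep : ((!acc.any fun u => pvSym u == pvSym x) = true) := by simp [hc]
        rw [hstep, ih (acc ++ [x]), if_pos hkeep, pvDedup_cons]
        simp only [List.append_assoc, List.cons_append, List.nil_append]
        congr 2
        rw [List.filter_filter]
        congr 1
        apply List.filter_congr
        intro t _
        simp only [List.any_append, List.any_cons, List.any_nil, Bool.or_false, Bool.not_or,
          Bool.and_comm]
        congr 1
        simp [eq_comm]

-- nested category folds = one fold over the flattened list
lemma pv_fold_flat (cats : List String) (vals : String → List (List (String × String)))
    (acc : List (List (String × String))) :
    cats.foldl (fun a c => (vals c).foldl pvStepA a) acc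
      = (cats.flatMap vals).foldl pvStepA acc := by
  induction cats generalizing acc with
  | nil => rfl
  | cons c cats ih => simp [List.flatMap_cons, List.foldl_append, ih]

-- ===== VERDICT =====
theorem get_all_tickers_py_spec : Claim_equal_get_all_tickers_py := by
  intro md _ _
  unfold Spec_get_all_tickers_py get_all_tickers_py get_all_tickers_py_alt
  rw [show (fun (a : List (List (String × String))) t =>
        if a.any (fun u => pvSym u == pvSym t) = true then a else a ++ [t]) = pvStepA from rfl]
  rw [pv_fold_flat, pv_foldl_dedup]
  simp
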